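-- pv_equiv track=rewrite | github.com/animeshokhade/dsa | scaler/Alternating Subarrays Easy.py | solve
-- ===== SOURCE A (Python) =====
-- def solve(A, B):
--     ans = []
--     N = len(A)
--     size = 2*B + 1
--     binaryType1 = [0] * size
--     binaryType2 = [0] * size
--     for index in range(size):
--         if index % 2 == 0:
--             binaryType1[index] = 1
--         elif index % 2 == 1:
--             binaryType2[index] = 1
--     for index in range(0, N - size + 1):
--         subArray = A[index:index + size]
--         if (subArray == binaryType1) or (subArray == binaryType2):
--             ans.append(index + B)
--     return ans
-- ===== SOURCE B (Python) =====
-- def solve(A, B):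
--     size = 2 * B + 1
--     ans = []
--     streak = 0
--     prev = None
--     for i, x in enumerate(A):
--         if x == 0 or x == 1:
--             streak = streak + 1 if (prev is not None and prev != x) else 1
--             prev = x
--         else:
--             streak = 0
--             prev = None
--         if streak >= size:
--             ans.append(i - B)
--     return ans
-- ===== Notes on version B (the rewrite author's own statement) =====
-- stated objective: faster
-- what changed: Replaced the per-start window slice-and-compare against two precomputed alternating patterns by a single pass that maintains the length of the current alternating-0/1 streak and emits a center whenever the streak reaches 2B+1.
-- outside the precondition, e.g. on solve([], -1): A returns [-1, 0], B returns []; on solve([0], -1): A returns [-1, 0, 1], B returns [1]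
import Mathlib
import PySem

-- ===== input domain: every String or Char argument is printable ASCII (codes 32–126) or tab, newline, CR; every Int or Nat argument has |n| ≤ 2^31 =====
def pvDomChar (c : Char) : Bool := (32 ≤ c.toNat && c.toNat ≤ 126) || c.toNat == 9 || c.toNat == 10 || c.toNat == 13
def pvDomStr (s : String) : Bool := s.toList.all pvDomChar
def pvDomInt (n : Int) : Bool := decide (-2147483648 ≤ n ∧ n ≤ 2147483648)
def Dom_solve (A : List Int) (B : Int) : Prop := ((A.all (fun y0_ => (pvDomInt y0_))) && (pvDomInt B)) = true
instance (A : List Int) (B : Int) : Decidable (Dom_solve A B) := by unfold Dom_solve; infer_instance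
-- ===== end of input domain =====

-- B replaces A's O(N*B) per-start slice-and-compare by a single O(N) pass tracking the
-- alternating-0/1 streak length (faster in a timing run, asymptotically so in B).


-- ===== PORT A =====
def solve (A : List Int) (B : Int) : List Int :=
  let N : Int := A.length
  let size : Int := 2 * B + 1
  let bt :=
    (PySem.List.pyRange 0 size 1).foldl
      (fun (bt : Array Int × Array Int) index =>
        if PySem.Int.mod index 2 = 0 then (bt.1.set! index.toNat 1, bt.2)
        else if PySem.Int.mod index 2 = 1 then (bt.1, bt.2.set! index.toNat 1)
        else bt)
      (Array.replicate size.toNat 0, Array.replicate size.toNat 0)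
  (PySem.List.pyRange 0 (N - size + 1) 1).foldl
    (fun ans index =>
      let subArray := PySem.List.slice A (some index) (some (index + size))
      if subArray = bt.1.toList ∨ subArray = bt.2.toList then ans ++ [index + B] else ans)
    []

-- ===== PORT B =====
def solve_alt (A : List Int) (B : Int) : List Int :=
  let size : Int := 2 * B + 1
  let r :=
    (PySem.List.enumerate A 0).foldl
      (fun (st : Int × Option Int × List Int) ix =>
        let i := ix.1
        let x := ix.2
        let sp : Int × Option Int :=
          if x = 0 ∨ x = 1 then
            (match st.2.1 with
             | some p => if p ≠ x then st.1 + 1 else 1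
             | none => 1, some x)
          else (0, none)
        let ans := if size ≤ sp.1 then st.2.2 ++ [i - B] else st.2.2
        (sp.1, sp.2, ans))
      (0, none, [])
  r.2.2

-- ===== PRECONDITION & SPEC =====
-- Pre_ excludes B < 0, where the window length 2B+1 is nonpositive and meaningless:
-- there A's empty-slice-vs-empty-pattern comparisons and B's always-satisfied streak
-- test each return accidental index lists of their own loops.
def Pre_solve (A : List Int) (B : Int) : Prop := 0 ≤ B
instance (A : List Int) (B : Int) : Decidable (Pre_solve A B) := by unfold Pre_solve; infer_instance
def pvWitness_solve : List Int × Int := ([1, 0, 1], 1)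
def Spec_solve (A : List Int) (B : Int) (out : List Int) : Prop := out = solve_alt A B
instance (A : List Int) (B : Int) (out : List Int) : Decidable (Spec_solve A B out) := by unfold Spec_solve; infer_instance

-- ===== CLAIM (what is proved, stated in full; the proofs are below) =====
def Claim_equal_solve : Prop := ∀ (A : List Int) (B : Int), Dom_solve A B → Pre_solve A B → Spec_solve A B (solve A B)

-- ===== LEMMAS AND PROOFS =====

def binB (x : Int) : Bool := x == 0 || x == 1
def pat : Int → Nat → List Int
  | _, 0 => []
  | v, n+1 => v :: pat (1 - v) n
def altbin : List Int → Bool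
  | [] => true
  | x :: t => binB x && (match t with | [] => true | y :: _ => decide (x ≠ y)) && altbin t

theorem pat_length (v : Int) (n : Nat) : (pat v n).length = n := by
  induction n generalizing v with
  | zero => rfl
  | succ k ih => simp [pat, ih]

theorem pat_snoc (v : Int) (n : Nat) :
    pat v (n+1) = pat v n ++ [if n % 2 = 0 then v else 1 - v] := by
  induction n generalizing v with
  | zero => simp [pat]
  | succ k ih =>
    have h1 : pat v (k+2) = v :: pat (1-v) (k+1) := rfl
    rw [h1, ih (1-v)]
    have hvv : (1 : Int) - (1 - v) = v := by ring
    rcases Nat.even_or_odd k with he | ho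
    · have hk : k % 2 = 0 := Nat.even_iff.mp he
      have hk1 : (k+1) % 2 = 1 := by omega
      simp [pat, hk, hk1, hvv]
    · have hk : k % 2 = 1 := Nat.odd_iff.mp ho
      have hk1 : (k+1) % 2 = 0 := by omega
      simp [pat, hk, hk1, hvv]

theorem altbin_pat (v : Int) (n : Nat) (hv : v = 0 ∨ v = 1) : altbin (pat v n) = true := by
  induction n generalizing v with
  | zero => rfl
  | succ k ih =>
    have hb : binB v = true := by rcases hv with h | h <;> simp [binB, h]
    have hv' : (1:Int) - v = 0 ∨ (1:Int) - v = 1 := by omega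
    cases k with
    | zero => simp [altbin, pat, hb]
    | succ m =>
      have hvv : (1:Int) - (1 - v) = v := by ring
      have tail : altbin ((1-v) :: pat v m) = true := by
        have h := ih (1-v) hv'
        rw [show pat (1-v) (m+1) = (1-v) :: pat (1-(1-v)) m from rfl, hvv] at h
        exact h
      have e : pat v (m+2) = v :: (1-v) :: pat v m := by
        show v :: pat (1-v) (m+1) = _
        rw [show pat (1-v) (m+1) = (1-v) :: pat (1-(1-v)) m from rfl, hvv]
      rw [e, show altbin (v :: (1-v) :: pat v m)
            = (binB v && decide (v ≠ 1-v) && altbin ((1-v) :: pat v m)) from rfl]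
      simp [hb, tail]
      omega

theorem altbin_cons2 (x y : Int) (t : List Int) :
    altbin (x :: y :: t) = (binB x && decide (x ≠ y) && altbin (y :: t)) := rfl

theorem altbin_one (x : Int) : altbin [x] = binB x := by simp [altbin]

theorem pat_iff (l : List Int) :
    (l = pat 1 l.length ∨ l = pat 0 l.length) ↔ altbin l = true := by
  induction l with
  | nil => simp [pat, altbin]
  | cons x t ih =>
    constructor
    · rintro (h | h) <;> (rw [h]; exact altbin_pat _ _ (by simp))
    · intro h
      cases t with
      | nil =>
        rw [altbin_one] at h
        have hxv : x = 0 ∨ x = 1 := by simp [binB] at h; tauto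
        rcases hxv with h0 | h0 <;> simp [h0, pat]
      | cons y t' =>
        rw [altbin_cons2] at h
        simp only [Bool.and_eq_true, decide_eq_true_eq] at h
        obtain ⟨⟨hx, hxy⟩, ht⟩ := h
        have hxv : x = 0 ∨ x = 1 := by simp [binB] at hx; tauto
        have ht' := ih.mpr ht
        rcases ht' with h1 | h1
        · have hy1 : y = 1 := by
            have hh := congrArg (fun l => l.head?) h1
            simp [pat] at hh; exact hh
          have hx0 : x = 0 := by omega
          right
          show x :: y :: t' = pat 0 ((y :: t').length + 1)
          rw [show pat 0 ((y :: t').length + 1) = 0 :: pat 1 (y :: t').length by norm_num [pat]]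
          rw [hx0, ← h1]
        · have hy0 : y = 0 := by
            have hh := congrArg (fun l => l.head?) h1
            simp [pat] at hh; exact hh
          have hx1 : x = 1 := by omega
          left
          show x :: y :: t' = pat 1 ((y :: t').length + 1)
          rw [show pat 1 ((y :: t').length + 1) = 1 :: pat 0 (y :: t').length by norm_num [pat]]
          rw [hx1, ← h1]

theorem altbin_snoc (t : List Int) (x : Int) :
    altbin (t ++ [x]) = (altbin t && binB x && decide (t.getLast? ≠ some x)) := by
  induction t with
  | nil => simp [altbin_one, altbin]
  | cons y t' ih =>
    cases t' with
    | nil =>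
      rw [show ([y] ++ [x]) = y :: x :: ([] : List Int) from rfl, altbin_cons2, altbin_one, altbin_one]
      simp [Bool.and_comm, Bool.and_assoc, Bool.and_left_comm]
    | cons z t'' =>
      rw [show ((y :: z :: t'') ++ [x]) = y :: ((z :: t'') ++ [x]) from rfl]
      rw [show (y :: ((z :: t'') ++ [x])) = y :: z :: (t'' ++ [x]) from rfl]
      rw [altbin_cons2, show (z :: (t'' ++ [x])) = (z :: t'') ++ [x] from rfl, ih, altbin_cons2]
      have : (y :: z :: t'').getLast? = (z :: t'').getLast? := by
        simp [List.getLast?_cons_cons]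
      rw [this]
      simp [Bool.and_assoc]

theorem altbin_last (l : List Int) (h : altbin l = true) (hne : l ≠ []) :
    ∃ x, l.getLast? = some x ∧ binB x = true := by
  induction l with
  | nil => simp at hne
  | cons y t ih =>
    cases t with
    | nil =>
      rw [altbin_one] at h
      exact ⟨y, by simp, h⟩
    | cons z t' =>
      rw [altbin_cons2] at h
      simp only [Bool.and_eq_true] at h
      obtain ⟨x, hx1, hx2⟩ := ih h.2 (by simp)
      exact ⟨x, by rw [List.getLast?_cons_cons]; exact hx1, hx2⟩

def stepS (st : Int × Option Int) (x : Int) : Int × Option Int :=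
  if x = 0 ∨ x = 1 then
    (match st.2 with | some p => if p ≠ x then st.1 + 1 else 1 | none => 1, some x)
  else (0, none)

def S (l : List Int) : Int × Option Int := l.foldl stepS (0, none)

theorem S_snoc (l : List Int) (x : Int) : S (l ++ [x]) = stepS (S l) x := by
  simp [S, List.foldl_append]

theorem S_nonneg (l : List Int) : 0 ≤ (S l).1 := by
  induction l using List.reverseRecOn with
  | nil => simp [S]
  | append_singleton l x ih =>
    rw [S_snoc]
    unfold stepS
    split_ifs with h
    · rcases hp : (S l).2 with _ | p <;> simp [hp]
      split_ifs <;> omega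
    · simp

theorem S_prev (l : List Int) :
    (S l).2 = (match l.getLast? with
               | some x => if x = 0 ∨ x = 1 then some x else none
               | none => none) := by
  induction l using List.reverseRecOn with
  | nil => simp [S]
  | append_singleton l x ih =>
    rw [S_snoc]
    unfold stepS
    split_ifs with h
    · rcases hp : (S l).2 with _ | p <;> simp [h]
    · simp [h]

theorem S_streak (l : List Int) (m : Nat) (hm : 1 ≤ m) :
    ((m : Int) ≤ (S l).1 ↔ (m ≤ l.length ∧ altbin (l.drop (l.length - m)) = true)) := by
  induction l using List.reverseRecOn generalizing m with
  | nil => simp [S]; omega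
  | append_singleton l x ih =>
    rw [S_snoc]
    have hlen : (l ++ [x]).length = l.length + 1 := by simp
    by_cases hmlen : m ≤ l.length + 1
    case neg =>
      constructor
      · intro hle
        exfalso
        have hnn := S_nonneg l
        have hbound : (stepS (S l) x).1 ≤ (S l).1 + 1 := by
          unfold stepS
          rcases hp : (S l).2 with _ | p <;> split_ifs <;> simp only [hp] <;> (try split_ifs) <;> (try simp) <;> omega
        have h2 : ¬ ((↑(m-1) : Int) ≤ (S l).1) := by
          intro hc
          have := (ih (m-1) (by omega)).mp hc
          omega
        push_cast at h2
        omega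
      · intro ⟨h1, _⟩
        rw [hlen] at h1
        omega
    case pos =>
      have hdrop : (l ++ [x]).drop (l.length + 1 - m) = l.drop (l.length - (m-1)) ++ [x] := by
        have harith : l.length + 1 - m = l.length - (m-1) := by omega
        rw [List.drop_append_of_le_length (by omega), harith]
      rw [hlen, hdrop, altbin_snoc]
      unfold stepS
      by_cases hbx : x = 0 ∨ x = 1
      case neg =>
        rw [if_neg hbx]
        constructor
        · intro h
          exfalso
          have h' : (m : Int) ≤ 0 := h
          omega
        · intro ⟨h1, h2⟩
          exfalso
          simp only [Bool.and_eq_true, decide_eq_true_eq] at h2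
          have : binB x = true := h2.1.2
          simp [binB] at this
          tauto
      case pos =>
        have hbxB : binB x = true := by simp [binB]; tauto
        simp only [hbx, if_true]
        by_cases hm1 : m = 1
        case pos =>
          subst hm1
          have hdn : l.drop (l.length - 0) = [] := by
            rw [Nat.sub_zero, List.drop_length]
          rw [show (1:Nat) - 1 = 0 from rfl, hdn]
          constructor
          · intro _
            refine ⟨by omega, ?_⟩
            simp [altbin, hbxB]
          · intro _
            have hnn := S_nonneg l
            rcases hp : (S l).2 with _ | p <;> simp only [hp]
            · norm_num
            · split_ifs <;> push_cast <;> omega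
        case neg =>
          -- m = m' + 1, m' ≥ 1
          obtain ⟨m', rfl⟩ : ∃ m', m = m' + 1 := ⟨m - 1, by omega⟩
          have hm' : 1 ≤ m' := by omega
          have ihm := ih m' hm'
          rw [show (m' + 1 : Nat) - 1 = m' from rfl]
          rcases hp : (S l).2 with _ | p
          · -- prev none: last of l missing or not binary
            simp only
            constructor
            · intro h; exfalso; push_cast at h; have := S_nonneg l; omega
            · intro ⟨h1, h2⟩
              exfalso
              simp only [Bool.and_eq_true, decide_eq_true_eq] at h2
              have hdne : l.drop (l.length - m') ≠ [] := by
                have : (l.drop (l.length - m')).length = m' := by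
                  rw [List.length_drop]; omega
                intro hc; rw [hc] at this; simp at this; omega
              obtain ⟨z, hz1, hz2⟩ := altbin_last _ h2.1.1 hdne
              have hzl : l.getLast? = some z := by
                rw [← hz1, List.getLast?_drop, if_neg (by omega)]
              have hSp := S_prev l
              rw [hzl, hp] at hSp
              simp [binB] at hz2
              rcases hz2 with hz | hz <;> simp [hz] at hSp
          · -- prev some p: l ends with binary p
            have hlast : l.getLast? = some p ∧ (p = 0 ∨ p = 1) := by
              have hSp := S_prev l
              rw [hp] at hSp
              rcases hl : l.getLast? with _ | q
              · rw [hl] at hSp; simp at hSp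
              · rw [hl] at hSp
                by_cases hc : q = 0 ∨ q = 1
                · simp only [if_pos hc] at hSp
                  have : p = q := by simpa using hSp
                  rw [this]; exact ⟨rfl, hc⟩
                · simp only [if_neg hc] at hSp; simp at hSp
            have hdlast : ∀ (h : m' ≤ l.length), (l.drop (l.length - m')).getLast? = some p := by
              intro h
              rw [List.getLast?_drop, if_neg (by omega)]
              exact hlast.1
            simp only
            split_ifs with hpx
            · -- p ≠ x : streak grows
              constructor
              · intro h
                have h' : (m' : Int) ≤ (S l).1 := by push_cast at h ⊢; omega
                obtain ⟨h1, h2⟩ := ihm.mp h'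
                refine ⟨by omega, ?_⟩
                simp only [Bool.and_eq_true, decide_eq_true_eq]
                refine ⟨⟨h2, hbxB⟩, ?_⟩
                rw [hdlast h1]
                intro hc
                exact hpx (by injection hc)
              · intro ⟨h1, h2⟩
                simp only [Bool.and_eq_true, decide_eq_true_eq] at h2
                have h' := ihm.mpr ⟨by omega, h2.1.1⟩
                push_cast at h' ⊢; omega
            · -- p = x : streak resets to 1, but m ≥ 2
              push_neg at hpx
              subst hpx
              constructor
              · intro h; exfalso; push_cast at h; omega
              · intro ⟨h1, h2⟩
                exfalso
                simp only [Bool.and_eq_true, decide_eq_true_eq] at h2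
                exact h2.2 (hdlast (by omega))

theorem enumerate_snoc (l : List Int) (x : Int) (s : Int) :
    PySem.List.enumerate (l ++ [x]) s = PySem.List.enumerate l s ++ [(s + l.length, x)] := by
  induction l generalizing s with
  | nil => simp [PySem.List.enumerate_cons, PySem.List.enumerate_nil]
  | cons y t ih =>
    rw [List.cons_append, PySem.List.enumerate_cons, PySem.List.enumerate_cons, ih]
    simp only [List.length_cons, List.cons_append, List.append_cancel_left_eq]
    push_cast
    ring_nf


def fullStep (B : Int) (st : Int × Option Int × List Int) (ix : Int × Int) : Int × Option Int × List Int :=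
  let sp := stepS (st.1, st.2.1) ix.2
  (sp.1, sp.2, if 2*B+1 ≤ sp.1 then st.2.2 ++ [ix.1 - B] else st.2.2)

theorem solve_alt_eq (A : List Int) (B : Int) :
    solve_alt A B = ((PySem.List.enumerate A 0).foldl (fullStep B) (0, none, [])).2.2 := rfl

theorem fold_char (A : List Int) (B : Int) :
    (PySem.List.enumerate A 0).foldl (fullStep B) (0, none, []) =
      ((S A).1, (S A).2,
        ((List.range A.length).filter
          (fun i => decide ((2*B+1 : Int) ≤ (S (A.take (i+1))).1))).map (fun i : Nat => (i : Int) - B)) := by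
  induction A using List.reverseRecOn with
  | nil => simp [S, PySem.List.enumerate_nil]
  | append_singleton l x ih =>
    rw [enumerate_snoc, List.foldl_append, ih]
    simp only [List.foldl_cons, List.foldl_nil]
    have hstep : ∀ (ans : List Int) (i : Int),
        fullStep B ((S l).1, (S l).2, ans) (i, x)
          = ((stepS (S l) x).1, (stepS (S l) x).2,
             if 2*B+1 ≤ (stepS (S l) x).1 then ans ++ [i - B] else ans) := by
      intro ans i; rfl
    rw [hstep, S_snoc]
    simp only [Prod.mk.injEq]
    refine ⟨trivial, trivial, ?_⟩
    rw [List.length_append, List.length_cons, List.length_nil, List.range_succ,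
        List.filter_append, List.map_append]
    have hfil : (List.range l.length).filter
          (fun i => decide ((2*B+1 : Int) ≤ (S ((l ++ [x]).take (i+1))).1))
        = (List.range l.length).filter
          (fun i => decide ((2*B+1 : Int) ≤ (S (l.take (i+1))).1)) := by
      apply List.filter_congr
      intro i hi
      rw [List.mem_range] at hi
      rw [List.take_append_of_le_length (by omega)]
    rw [hfil]
    have hone : (([l.length].filter
          (fun i => decide ((2*B+1 : Int) ≤ (S ((l ++ [x]).take (i+1))).1))).map (fun i : Nat => (i : Int) - B))
        = if 2*B+1 ≤ (stepS (S l) x).1 then [((l.length : Int)) - B] else [] := by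
      have ht2 : (l ++ [x]).take (l.length + 1) = l ++ [x] := by
        apply List.take_of_length_le
        simp
      rw [List.filter_singleton, ht2, ← S_snoc]
      split_ifs with hc
      · simp [hc]
      · simp [hc]
    rw [hone]
    split_ifs with hc
    · simp
    · simp

theorem S_le_len (l : List Int) : (S l).1 ≤ l.length := by
  by_cases h : 1 ≤ (S l).1
  · have h2 := (S_streak l (S l).1.toNat (by omega)).mp (by omega)
    omega
  · omega

theorem set_mid (p r : List Int) (v w : Int) :
    (p ++ w :: r).set p.length v = p ++ v :: r := by
  rw [List.set_append, if_neg (by omega)]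
  simp

theorem build_inv (n k : Nat) (hk : k ≤ n) :
    (PySem.List.pyRange 0 (k : Int) 1).foldl
      (fun (bt : List Int × List Int) index =>
        if PySem.Int.mod index 2 = 0 then (bt.1.set index.toNat 1, bt.2)
        else if PySem.Int.mod index 2 = 1 then (bt.1, bt.2.set index.toNat 1)
        else bt)
      (List.replicate n 0, List.replicate n 0)
    = (pat 1 k ++ List.replicate (n-k) 0, pat 0 k ++ List.replicate (n-k) 0) := by
  induction k with
  | zero =>
    rw [show ((0:Nat) : Int) = 0 from rfl, PySem.List.pyRange_one_eq_nil (by omega)]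
    simp [pat]
  | succ k ih =>
    have hcast : ((k+1 : Nat) : Int) = (k : Int) + 1 := by push_cast; ring
    rw [hcast, PySem.List.pyRange_one_succ_right (by omega), List.foldl_append, ih (by omega)]
    simp only [List.foldl_cons, List.foldl_nil]
    have hmod : PySem.Int.mod (k : Int) 2 = ((k % 2 : Nat) : Int) := PySem.Int.mod_natCast k 2
    have hrep : List.replicate (n - k) (0 : Int) = 0 :: List.replicate (n - (k+1)) 0 := by
      rw [show n - k = (n - (k+1)) + 1 by omega, List.replicate_succ]
    have hlen1 : (pat 1 k).length = k := pat_length 1 k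
    have hlen0 : (pat 0 k).length = k := pat_length 0 k
    rcases Nat.even_or_odd k with he | ho
    · have hk2 : k % 2 = 0 := Nat.even_iff.mp he
      rw [hmod, hk2]
      rw [if_pos (by norm_num)]
      simp only [Int.toNat_natCast]
      rw [hrep]
      have e1 := set_mid (pat 1 k) (List.replicate (n - (k+1)) 0) 1 0
      rw [hlen1] at e1
      rw [e1]
      rw [pat_snoc 1 k, pat_snoc 0 k, hk2]
      simp [List.append_assoc]
    · have hk2 : k % 2 = 1 := Nat.odd_iff.mp ho
      rw [hmod, hk2]
      rw [if_neg (by norm_num), if_pos (by norm_num)]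
      simp only [Int.toNat_natCast]
      rw [hrep]
      have e1 := set_mid (pat 0 k) (List.replicate (n - (k+1)) 0) 1 0
      rw [hlen0] at e1
      rw [e1]
      rw [pat_snoc 1 k, pat_snoc 0 k, hk2]
      simp [List.append_assoc]

theorem build_arr (n : Nat) :
    (PySem.List.pyRange 0 (n : Int) 1).foldl
      (fun (bt : Array Int × Array Int) index =>
        if PySem.Int.mod index 2 = 0 then (bt.1.set! index.toNat 1, bt.2)
        else if PySem.Int.mod index 2 = 1 then (bt.1, bt.2.set! index.toNat 1)
        else bt)
      (Array.replicate n 0, Array.replicate n 0)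
    = ((pat 1 n).toArray, (pat 0 n).toArray) := by
  have key : (((PySem.List.pyRange 0 (n : Int) 1).foldl
      (fun (bt : Array Int × Array Int) index =>
        if PySem.Int.mod index 2 = 0 then (bt.1.set! index.toNat 1, bt.2)
        else if PySem.Int.mod index 2 = 1 then (bt.1, bt.2.set! index.toNat 1)
        else bt)
      (Array.replicate n 0, Array.replicate n 0)).1.toList,
      ((PySem.List.pyRange 0 (n : Int) 1).foldl
      (fun (bt : Array Int × Array Int) index =>
        if PySem.Int.mod index 2 = 0 then (bt.1.set! index.toNat 1, bt.2)
        else if PySem.Int.mod index 2 = 1 then (bt.1, bt.2.set! index.toNat 1)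
        else bt)
      (Array.replicate n 0, Array.replicate n 0)).2.toList)
      = (pat 1 n, pat 0 n) := by
    have hom := (List.foldl_hom
      (f := fun (p : Array Int × Array Int) => (p.1.toList, p.2.toList))
      (g₁ := fun (bt : Array Int × Array Int) index =>
        if PySem.Int.mod index 2 = 0 then (bt.1.set! index.toNat 1, bt.2)
        else if PySem.Int.mod index 2 = 1 then (bt.1, bt.2.set! index.toNat 1)
        else bt)
      (g₂ := fun (bt : List Int × List Int) index =>
        if PySem.Int.mod index 2 = 0 then (bt.1.set index.toNat 1, bt.2)
        else if PySem.Int.mod index 2 = 1 then (bt.1, bt.2.set index.toNat 1)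
        else bt)
      (l := PySem.List.pyRange 0 (n : Int) 1)
      (init := (Array.replicate n 0, Array.replicate n 0))
      (H := by
        intro a x
        dsimp only
        split_ifs <;> simp)).symm
    rw [hom]
    have hinit : (((Array.replicate n (0:Int), Array.replicate n (0:Int)).1.toList,
        (Array.replicate n (0:Int), Array.replicate n (0:Int)).2.toList))
        = (List.replicate n (0:Int), List.replicate n (0:Int)) := by
      simp
    rw [hinit, build_inv n n (le_refl _)]
    simp
  have h1 := congrArg Prod.fst key
  have h2 := congrArg Prod.snd key
  simp only at h1 h2
  exact Prod.ext (Array.ext' (by simpa using h1)) (Array.ext' (by simpa using h2))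

theorem a_char (A : List Int) (B : Int) (hB : 0 ≤ B) :
    solve A B =
      ((List.range ((A.length : Int) - (2*B+1) + 1).toNat).filter
        (fun s : Nat => decide
          (PySem.List.slice A (some (s : Int)) (some ((s : Int) + ((2*B+1).toNat : Int))) = pat 1 (2*B+1).toNat ∨
           PySem.List.slice A (some (s : Int)) (some ((s : Int) + ((2*B+1).toNat : Int))) = pat 0 (2*B+1).toNat))).map
        (fun s : Nat => (s : Int) + B) := by
  have hsz : (2*B+1 : Int) = (((2*B+1).toNat : Nat) : Int) := by omega
  simp only [solve]
  rw [hsz]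
  simp only [Int.toNat_natCast]
  simp only [build_arr ((2*B+1).toNat), List.toList_toArray]
  rw [PySem.List.foldl_append_ite
    (p := fun index => PySem.List.slice A (some index) (some (index + ((2*B+1).toNat : Int))) = pat 1 (2*B+1).toNat ∨
                       PySem.List.slice A (some index) (some (index + ((2*B+1).toNat : Int))) = pat 0 (2*B+1).toNat)
    (f := fun index => index + B)]
  rw [List.nil_append, PySem.List.pyRange_one]
  rw [List.filter_map, List.map_map]
  simp only [Function.comp_def, zero_add, sub_zero]
  simp only [← hsz]

theorem alt_char2 (A : List Int) (B : Int) :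
    solve_alt A B =
      ((List.range A.length).filter
        (fun i => decide ((2*B+1 : Int) ≤ (S (A.take (i+1))).1))).map (fun i : Nat => (i : Int) - B) := by
  rw [solve_alt_eq, fold_char]

theorem main_eq (A : List Int) (B : Int) (hB : 0 ≤ B) : solve A B = solve_alt A B := by
  rw [a_char A B hB, alt_char2]
  have hn1 : 1 ≤ (2*B+1).toNat := by omega
  set N := A.length with hN
  set n := (2*B+1).toNat with hn
  have hcast : ((n : Nat) : Int) = 2*B+1 := by omega
  have hQfalse : ∀ i : Nat, i + 1 < n → ¬ ((2*B+1 : Int) ≤ (S (A.take (i+1))).1) := by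
    intro i hi hc
    have h1 := S_le_len (A.take (i+1))
    have h2 : (A.take (i+1)).length ≤ i+1 := by
      simp [List.length_take]
    omega
  have hM : ((N : Int) - (2*B+1) + 1).toNat = N + 1 - n := by omega
  rw [hM]
  by_cases hNn : N + 1 ≤ n
  · rw [show N + 1 - n = 0 by omega, List.range_zero, List.filter_nil, List.map_nil]
    have hnil0 : (List.range N).filter
        (fun i => decide ((2*B+1 : Int) ≤ (S (A.take (i+1))).1)) = [] := by
      apply List.filter_eq_nil_iff.mpr
      intro i hi
      rw [List.mem_range] at hi
      simp only [decide_eq_true_eq]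
      exact hQfalse i (by omega)
    rw [hnil0, List.map_nil]
  · have hr : List.range N = List.range (n-1) ++ (List.range (N+1-n)).map (fun x => (n-1) + x) := by
      have hsum : (n-1) + (N+1-n) = N := by omega
      have hr0 : List.range ((n-1) + (N+1-n))
          = List.range (n-1) ++ (List.range (N+1-n)).map (fun x => (n-1) + x) := List.range_add
      rw [hsum] at hr0
      exact hr0
    rw [hr, List.filter_append, List.map_append]
    have hnil1 : (List.range (n-1)).filter
        (fun i => decide ((2*B+1 : Int) ≤ (S (A.take (i+1))).1)) = [] := by
      apply List.filter_eq_nil_iff.mpr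
      intro i hi
      rw [List.mem_range] at hi
      simp only [decide_eq_true_eq]
      exact hQfalse i (by omega)
    rw [hnil1, List.map_nil, List.nil_append, List.filter_map, List.map_map]
    have hfil : (List.range (N+1-n)).filter
          ((fun i : Nat => decide ((2*B+1 : Int) ≤ (S (A.take (i+1))).1)) ∘ (fun x => (n-1) + x))
        = (List.range (N+1-n)).filter
          (fun s : Nat => decide
            (PySem.List.slice A (some (s : Int)) (some ((s : Int) + ((n : Nat) : Int))) = pat 1 n ∨
             PySem.List.slice A (some (s : Int)) (some ((s : Int) + ((n : Nat) : Int))) = pat 0 n)) := by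
      apply List.filter_congr
      intro s hs
      rw [List.mem_range] at hs
      have hsn : s + n ≤ N := by omega
      simp only [Function.comp_apply, decide_eq_decide]
      have htk : A.take ((n-1) + s + 1) = A.take (s+n) := by
        congr 1
        omega
      have hlen : (A.take (s+n)).length = s + n := by
        simp [List.length_take]
        omega
      rw [htk, ← hcast, S_streak (A.take (s+n)) n hn1, hlen]
      have hdt : (A.take (s+n)).drop ((s+n) - n) = (A.drop s).take n := by
        rw [show (s+n) - n = s by omega, List.drop_take]
        congr 1
        omega
      rw [hdt]
      have hsl : PySem.List.slice A (some (s : Int)) (some ((s : Int) + ((n : Nat) : Int)))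
          = (A.drop s).take n := PySem.List.slice_natCast_add A s n
      rw [hsl]
      have hplen : ((A.drop s).take n).length = n := by
        simp [List.length_take, List.length_drop]
        omega
      constructor
      · intro ⟨_, h2⟩
        have h3 := (pat_iff ((A.drop s).take n)).mpr h2
        rw [hplen] at h3
        exact h3
      · intro h
        exact ⟨by omega, (pat_iff _).mp (by rw [hplen]; tauto)⟩
    rw [← hfil]
    apply List.map_congr_left
    intro s hs
    rw [List.mem_filter, List.mem_range] at hs
    simp only [Function.comp_apply]
    have he : ((((n-1) + s : Nat)) : Int) = (s : Int) + 2*B := by omega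
    rw [he]
    ring

-- ===== VERDICT (by name: the statement is the Claim_ definition above) =====
theorem solve_spec : Claim_equal_solve := by
  intro A B _ hB
  unfold Spec_solve
  exact main_eq A B hB
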